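-- pv_equiv track=rewrite | github.com/guilhermelino14/Projeto-Warehouse | warehouse/warehouse_individual.py | colisao
-- ===== SOURCE A (Python) =====
-- def colisao(all_path, indice):
--     cells_num_determinado_indice = []
--     for forklift_path in all_path:
--         if indice > len(forklift_path)-1:
--             continue
--         cell = forklift_path[indice]
--         if cell in cells_num_determinado_indice:
--             return True
--         cells_num_determinado_indice.append(cell)
--     return False
-- ===== SOURCE B (Python) =====
-- def colisao(all_path, indice):
--     cells = [p[indice] for p in all_path if indice <= len(p) - 1]
--     return len(cells) != len(set(cells))
-- ===== Notes on version B (the rewrite author's own statement) =====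
-- stated objective: simpler
-- what changed: Replaces the early-exit loop with a running membership list by a gather-then-compare shape: collect the cells at the index in one comprehension and detect a duplicate by comparing list length with set cardinality.
-- outside the precondition, e.g. on colisao([[(0, 0)], [(0, 0)], []], -1): A returns True, B raises IndexError
import Mathlib
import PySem

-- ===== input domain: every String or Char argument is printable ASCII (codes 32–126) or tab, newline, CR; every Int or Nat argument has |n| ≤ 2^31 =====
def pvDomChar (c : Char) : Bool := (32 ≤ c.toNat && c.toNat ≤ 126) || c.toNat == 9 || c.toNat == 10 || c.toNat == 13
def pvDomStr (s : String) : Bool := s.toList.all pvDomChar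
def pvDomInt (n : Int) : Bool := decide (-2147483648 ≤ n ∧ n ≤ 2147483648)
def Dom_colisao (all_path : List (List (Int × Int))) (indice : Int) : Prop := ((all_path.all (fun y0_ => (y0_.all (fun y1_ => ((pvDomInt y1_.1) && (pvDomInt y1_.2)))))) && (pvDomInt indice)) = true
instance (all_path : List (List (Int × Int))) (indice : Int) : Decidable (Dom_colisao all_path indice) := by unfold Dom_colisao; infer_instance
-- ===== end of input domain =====

-- B gathers the cells at the index in one pass and detects a duplicate by comparing
-- list length with set cardinality, instead of A's early-exit loop with a membership list (objective: simpler).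

-- ===== PORT A =====
def colisaoAux (indice : Int) (paths : List (List (Int × Int))) (acc : List (Int × Int)) : Bool :=
  match paths with
  | [] => false
  | forklift_path :: rest =>
    if indice > PySem.List.len forklift_path - 1 then
      colisaoAux indice rest acc
    else
      match PySem.List.pyGet? forklift_path indice with
      | none => false  -- Python raises IndexError here; excluded by Pre_colisao
      | some cell =>
        if acc.contains cell then true
        else colisaoAux indice rest (acc ++ [cell])

def colisao (all_path : List (List (Int × Int))) (indice : Int) : Bool :=
  colisaoAux indice all_path []

-- ===== PORT B =====
def colisao_alt (all_path : List (List (Int × Int))) (indice : Int) : Bool :=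
  let cells := (all_path.filter (fun p => decide (indice ≤ PySem.List.len p - 1))).map
      (fun p => (PySem.List.pyGet? p indice).getD (0, 0))  -- getD default unreachable under Pre_colisao
  decide (PySem.List.len cells ≠ PySem.List.len (PySem.Set.ofList cells))

-- ===== PRECONDITION & SPEC =====
-- Pre_ excludes inputs where some non-skipped path has an out-of-range (negative) index:
-- there Python A raises IndexError (or, if a duplicate appears before that path, returns True
-- while B's comprehension still raises on it).
def Pre_colisao (all_path : List (List (Int × Int))) (indice : Int) : Prop :=
  ∀ p ∈ all_path, indice ≤ PySem.List.len p - 1 → PySem.Raise.InRange p.length indice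
instance (all_path : List (List (Int × Int))) (indice : Int) : Decidable (Pre_colisao all_path indice) := by unfold Pre_colisao; infer_instance

def pvWitness_colisao : (List (List (Int × Int))) × Int := ([[(0, 0)], [(1, 1)], [(0, 0)]], 0)

def Spec_colisao (all_path : List (List (Int × Int))) (indice : Int) (out : Bool) : Prop := out = colisao_alt all_path indice
instance (all_path : List (List (Int × Int))) (indice : Int) (out : Bool) : Decidable (Spec_colisao all_path indice out) := by unfold Spec_colisao; infer_instance

-- ===== CLAIM (what is proved, stated in full; the proofs are below) =====
def Claim_equal_colisao : Prop := ∀ (all_path : List (List (Int × Int))) (indice : Int), Dom_colisao all_path indice → Pre_colisao all_path indice → Spec_colisao all_path indice (colisao all_path indice)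

-- ===== LEMMAS AND PROOFS =====

-- the list of cells both programs look at
def cellsOf (indice : Int) (paths : List (List (Int × Int))) : List (Int × Int) :=
  (paths.filter (fun p => decide (indice ≤ PySem.List.len p - 1))).map
    (fun p => (PySem.List.pyGet? p indice).getD (0, 0))

lemma foldl_add_length_le (l s : List (Int × Int)) :
    (l.foldl PySem.Set.add s).length ≤ s.length + l.length := by
  induction l generalizing s with
  | nil => simp
  | cons x xs ih =>
    simp only [List.foldl_cons]
    have := ih (PySem.Set.add s x)
    have hadd : (PySem.Set.add s x).length ≤ s.length + 1 := by
      simp [PySem.Set.add]; split_ifs <;> simp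
    simp only [List.length_cons]
    omega

lemma foldl_add_length_eq_iff (l s : List (Int × Int)) :
    (l.foldl PySem.Set.add s).length = s.length + l.length ↔ l.Nodup ∧ ∀ x ∈ l, x ∉ s := by
  induction l generalizing s with
  | nil => simp
  | cons x xs ih =>
    simp only [List.foldl_cons, List.nodup_cons]
    by_cases hx : x ∈ s
    · have hadd : PySem.Set.add s x = s := by simp [PySem.Set.add, hx]
      rw [hadd]
      have := foldl_add_length_le xs s
      constructor
      · intro h; simp at h; omega
      · rintro ⟨_, h⟩; exact absurd hx (h x (by simp))
    · have hadd : PySem.Set.add s x = s ++ [x] := by simp [PySem.Set.add, hx]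
      rw [hadd,
        show s.length + (x :: xs).length = (s ++ [x]).length + xs.length from by simp; omega,
        ih]
      constructor
      · rintro ⟨hnd, hmem⟩
        refine ⟨⟨fun hxm => by simpa using (hmem x hxm), hnd⟩, ?_⟩
        intro y hy hys
        rcases List.mem_cons.mp hy with rfl | hy'
        · exact hx hys
        · exact (by simpa using hmem y hy' : y ∉ s ∧ y ≠ x).1 hys
      · rintro ⟨⟨hxx, hnd⟩, hmem⟩
        refine ⟨hnd, ?_⟩
        intro y hy
        simp only [List.mem_append, List.mem_singleton]
        rintro (hys | rfl)
        · exact hmem y (by simp [hy]) hys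
        · exact hxx hy

lemma ofList_length_eq_iff (l : List (Int × Int)) :
    (PySem.Set.ofList l).length = l.length ↔ l.Nodup := by
  rw [PySem.Set.ofList_eq_foldl]
  have := foldl_add_length_eq_iff l []
  simp at this
  simpa using this

lemma colisaoAux_eq (indice : Int) (paths : List (List (Int × Int)))
    (acc : List (Int × Int)) (hacc : acc.Nodup)
    (hpre : ∀ p ∈ paths, indice ≤ PySem.List.len p - 1 → PySem.Raise.InRange p.length indice) :
    colisaoAux indice paths acc = decide (¬ (acc ++ cellsOf indice paths).Nodup) := by
  induction paths generalizing acc with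
  | nil => simp [colisaoAux, cellsOf, hacc]
  | cons p rest ih =>
    by_cases hskip : indice > PySem.List.len p - 1
    · have hfilter : cellsOf indice (p :: rest) = cellsOf indice rest := by
        unfold cellsOf
        rw [List.filter_cons_of_neg (by simpa using (by omega : ¬ indice ≤ PySem.List.len p - 1))]
      have hstep : colisaoAux indice (p :: rest) acc = colisaoAux indice rest acc := by
        conv_lhs => unfold colisaoAux
        rw [if_pos hskip]
      rw [hstep, hfilter]
      exact ih acc hacc (fun q hq => hpre q (by simp [hq]))
    · have hskip' : indice ≤ PySem.List.len p - 1 := by omega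
      have hin : PySem.Raise.InRange p.length indice := hpre p (by simp) hskip'
      rcases h : PySem.List.pyGet? p indice with _ | c
      · rw [PySem.List.pyGet?_eq_none_iff] at h; exact absurd hin h
      have hfilter : cellsOf indice (p :: rest) = c :: cellsOf indice rest := by
        unfold cellsOf
        rw [List.filter_cons_of_pos (by simpa using hskip')]
        simp [h]
      have hstep : colisaoAux indice (p :: rest) acc =
          (if acc.contains c then true else colisaoAux indice rest (acc ++ [c])) := by
        conv_lhs => unfold colisaoAux
        rw [if_neg (by omega), h]
      rw [hstep, hfilter]
      by_cases hc : c ∈ acc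
      · have hnot : ¬ (acc ++ c :: cellsOf indice rest).Nodup := by
          intro hnd
          exact (List.disjoint_of_nodup_append hnd) hc (by simp)
        rw [if_pos (by simpa using hc)]
        simp [hnot]
      · have hacc' : (acc ++ [c]).Nodup := by
          rw [List.nodup_append]
          refine ⟨hacc, by simp, ?_⟩
          intro a ha b hb
          rw [List.mem_singleton] at hb
          subst hb
          exact fun hEq => hc (hEq ▸ ha)
        rw [if_neg (by simpa using hc),
          ih (acc ++ [c]) hacc' (fun q hq => hpre q (by simp [hq])),
          List.append_assoc]
        simp

-- ===== VERDICT (by name: the statement is the Claim_ definition above) =====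
theorem colisao_spec : Claim_equal_colisao := by
  intro all_path indice _ hpre
  unfold Spec_colisao colisao colisao_alt
  have hpre' : ∀ p ∈ all_path, indice ≤ PySem.List.len p - 1 → PySem.Raise.InRange p.length indice := hpre
  rw [colisaoAux_eq indice all_path [] (by simp) hpre']
  simp only [List.nil_append]
  show _ = decide (PySem.List.len (cellsOf indice all_path) ≠ PySem.List.len (PySem.Set.ofList (cellsOf indice all_path)))
  have hle := PySem.Set.length_ofList_le (xs := cellsOf indice all_path)
  have hiff := ofList_length_eq_iff (cellsOf indice all_path)
  simp only [PySem.List.len_eq]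
  by_cases hnd : (cellsOf indice all_path).Nodup
  · simp [hnd, hiff.mpr hnd]
  · have hne : (PySem.Set.ofList (cellsOf indice all_path)).length ≠ (cellsOf indice all_path).length := fun h => hnd (hiff.mp h)
    simp [hnd]
    omega
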